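-- pv_equiv track=rewrite | github.com/ZorokaJuro540/ShadowRollV5 | modules/text_styling.py | vaporwave
-- ===== SOURCE A (Python) =====
-- def vaporwave(text: str) -> str:
--     """Convert text to vaporwave style (full-width characters)"""
--     normal = "ABCDEFGHIJKLMNOPQRSTUVWXYZabcdefghijklmnopqrstuvwxyz0123456789"
--     vaporwave = "ＡＢＣＤＥＦＧＨＩＪＫＬＭＮＯＰＱＲＳＴＵＶＷＸＹＺａｂｃｄｅｆｇｈｉｊｋｌｍｎｏｐｑｒｓｔｕｖｗｘｙｚ０１２３４５６７８９"
--
--     result = ""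
--     for char in text:
--         if char in normal:
--             result += vaporwave[normal.index(char)]
--         else:
--             result += char
--     return result
-- ===== SOURCE B (Python) =====
-- def vaporwave(text: str) -> str:
--     """Convert text to vaporwave style (full-width characters)"""
--     return ''.join(
--         chr(ord(c) + 0xFEE0) if c.isascii() and c.isalnum() else c
--         for c in text
--     )
-- ===== Notes on version B (the rewrite author's own statement) =====
-- stated objective: idiomatic
-- what changed: Replaces the two 62-char lookup tables (membership test + .index scan per character) with a closed-form Unicode offset: ASCII alphanumerics are shifted by 0xFEE0, joined in one pass.
import Mathlib
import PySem

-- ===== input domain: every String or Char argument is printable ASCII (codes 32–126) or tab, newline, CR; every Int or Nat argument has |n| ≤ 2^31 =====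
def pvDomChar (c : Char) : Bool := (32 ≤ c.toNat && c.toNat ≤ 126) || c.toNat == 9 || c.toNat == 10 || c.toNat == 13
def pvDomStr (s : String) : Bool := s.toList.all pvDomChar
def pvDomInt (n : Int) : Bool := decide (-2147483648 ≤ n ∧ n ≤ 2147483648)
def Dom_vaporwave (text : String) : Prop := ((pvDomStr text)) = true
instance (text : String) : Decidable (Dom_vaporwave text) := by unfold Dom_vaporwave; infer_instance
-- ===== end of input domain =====

-- B replaces A's two 62-char lookup tables (membership scan + .index scan per character)
-- with the closed-form full-width codepoint offset 0xFEE0 on ASCII alphanumerics.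

-- ===== PORT A =====
def vwNormal : List Char := "ABCDEFGHIJKLMNOPQRSTUVWXYZabcdefghijklmnopqrstuvwxyz0123456789".toList
def vwVapor : List Char := "ＡＢＣＤＥＦＧＨＩＪＫＬＭＮＯＰＱＲＳＴＵＶＷＸＹＺａｂｃｄｅｆｇｈｉｊｋｌｍｎｏｐｑｒｓｔｕｖｗｘｙｚ０１２３４５６７８９".toList

-- one iteration of A's loop body on one character (the getD defaults are unreachable:
-- inside the branch `contains` guarantees index? = some i with i < 62 = vwVapor.length)
def vwStepA (c : Char) : List Char :=
  if vwNormal.contains c then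
    [vwVapor.getD ((PySem.List.index? vwNormal c).getD 0) c]
  else
    [c]

def vaporwave (text : String) : String :=
  String.mk (text.toList.foldl (fun result c => result ++ vwStepA c) [])

-- ===== PORT B =====
-- Source B: chr(ord(c) + 0xFEE0) if c.isascii() and c.isalnum() else c, joined over text
def vwStepB (c : Char) : Char :=
  if c.toNat ≤ 127 && PySem.Chars.isalnum c then Char.ofNat (c.toNat + 0xFEE0) else c

def vaporwave_alt (text : String) : String :=
  String.mk (text.toList.map vwStepB)

-- ===== PRECONDITION & SPEC =====
def Spec_vaporwave (text : String) (out : String) : Prop := out = vaporwave_alt text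
instance (text : String) (out : String) : Decidable (Spec_vaporwave text out) := by unfold Spec_vaporwave; infer_instance

-- ===== CLAIM (what is proved, stated in full; the proofs are below) =====
def Claim_equal_vaporwave : Prop := ∀ (text : String), Dom_vaporwave text → Spec_vaporwave text (vaporwave text)

-- ===== LEMMAS AND PROOFS =====

-- per-character agreement on all of ASCII, checked exhaustively
set_option maxRecDepth 4000 in
theorem vwStep_agree_fin : ∀ n : Fin 128, vwStepA (Char.ofNat n.val) = [vwStepB (Char.ofNat n.val)] := by decide

theorem vwStep_agree (c : Char) (h : pvDomChar c = true) : vwStepA c = [vwStepB c] := by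
  have hlt : c.toNat < 128 := by
    simp only [pvDomChar, Bool.or_eq_true, Bool.and_eq_true, decide_eq_true_eq, beq_iff_eq] at h
    omega
  have := vwStep_agree_fin ⟨c.toNat, hlt⟩
  simpa [Char.ofNat_toNat] using this

theorem vw_foldl (l : List Char) (acc : List Char) (h : ∀ c ∈ l, pvDomChar c = true) :
    l.foldl (fun result c => result ++ vwStepA c) acc = acc ++ l.map vwStepB := by
  induction l generalizing acc with
  | nil => simp
  | cons c t ih =>
    simp only [List.foldl_cons, List.map_cons]
    rw [ih _ (fun x hx => h x (List.mem_cons_of_mem _ hx)),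
        vwStep_agree c (h c (List.mem_cons_self ..))]
    simp

-- ===== VERDICT (by name: the statement is the Claim_ definition above) =====
theorem vaporwave_spec : Claim_equal_vaporwave := by
  intro text hdom
  unfold Spec_vaporwave vaporwave vaporwave_alt
  have h : ∀ c ∈ text.toList, pvDomChar c = true := by
    simpa [Dom_vaporwave, pvDomStr, List.all_eq_true] using hdom
  rw [vw_foldl _ [] h]
  simp
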